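-- pv_equiv track=rewrite | github.com/U-Abhishek/hidden-health-marker-hunting | streamlit app/services/health_metrics.py | categorize_risk_levels
-- ===== SOURCE A (Python) =====
-- from typing import Dict, List, Any, Optional, Tuple
--
-- def categorize_risk_levels(scores: Dict[str, int]) -> Dict[str, str]:
--     """
--     Categorize health scores into risk levels.
--
--     Parameters
--     ----------
--     scores : Dict[str, int]
--         Health scores
--
--     Returns
--     -------
--     Dict[str, str]
--         Risk level categories
--     """
--     risk_levels = {}
--
--     for factor, score in scores.items():
--         if score >= 80:
--             risk_levels[factor] = "Very High Risk"
--         elif score >= 60: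
--             risk_levels[factor] = "High Risk"
--         elif score >= 40:
--             risk_levels[factor] = "Moderate Risk"
--         elif score >= 20:
--             risk_levels[factor] = "Low Risk"
--         else:
--             risk_levels[factor] = "Minimal Risk"
--
--     return risk_levels
-- ===== SOURCE B (Python) =====
-- _THRESHOLDS = [20, 40, 60, 80]
-- _LABELS = ["Minimal Risk", "Low Risk", "Moderate Risk", "High Risk", "Very High Risk"]
--
--
-- def _bucket(score):
--     """Binary search: index of the first threshold strictly greater than score."""
--     lo, hi = 0, len(_THRESHOLDS)
--     while lo < hi:
--         mid = (lo + hi) // 2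
--         if score >= _THRESHOLDS[mid]:
--             lo = mid + 1
--         else:
--             hi = mid
--     return lo
--
--
-- def categorize_risk_levels(scores):
--     return {factor: _LABELS[_bucket(score)] for factor, score in scores.items()}
-- ===== Notes on version B (the rewrite author's own statement) =====
-- stated objective: idiomatic
-- what changed: Replaces the if/elif threshold cascade with a data-driven table: a thresholds list searched by binary search picks the bucket index into a parallel labels list, built as a dict comprehension.
import Mathlib
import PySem

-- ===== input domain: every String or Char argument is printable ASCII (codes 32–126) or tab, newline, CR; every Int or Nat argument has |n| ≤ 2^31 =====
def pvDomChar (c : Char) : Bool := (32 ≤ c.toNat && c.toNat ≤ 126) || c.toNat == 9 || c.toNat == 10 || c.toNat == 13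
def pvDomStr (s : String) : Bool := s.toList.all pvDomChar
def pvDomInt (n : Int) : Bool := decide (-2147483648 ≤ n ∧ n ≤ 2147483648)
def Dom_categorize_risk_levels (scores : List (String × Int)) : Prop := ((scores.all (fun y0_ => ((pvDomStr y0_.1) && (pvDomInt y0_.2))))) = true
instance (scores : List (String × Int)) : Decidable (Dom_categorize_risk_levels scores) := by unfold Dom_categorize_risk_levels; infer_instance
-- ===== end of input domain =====

-- B replaces A's if/elif cascade by a thresholds table searched with binary search
-- into a parallel labels list (objective: idiomatic, data-driven).

-- ===== PORT A =====
def categorize_risk_levels (scores : List (String × Int)) : List (String × String) :=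
  (scores.foldl (fun risk_levels p =>
    if p.2 ≥ 80 then risk_levels.insert p.1 "Very High Risk"
    else if p.2 ≥ 60 then risk_levels.insert p.1 "High Risk"
    else if p.2 ≥ 40 then risk_levels.insert p.1 "Moderate Risk"
    else if p.2 ≥ 20 then risk_levels.insert p.1 "Low Risk"
    else risk_levels.insert p.1 "Minimal Risk") (PySem.Dict.empty : PySem.Dict String String)).items

-- ===== PORT B =====
def pvThresholds : List Int := [20, 40, 60, 80]
def pvLabels : List String := ["Minimal Risk", "Low Risk", "Moderate Risk", "High Risk", "Very High Risk"]

-- _bucket's binary-search loop; mid is always a valid index, so getD is exact here.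
-- The fuel argument (hi - lo bounds the iteration count) only makes the loop structural.
def pvBucketGo : Nat → Int → Nat → Nat → Nat
  | 0, _, lo, _ => lo
  | fuel + 1, score, lo, hi =>
    if lo < hi then
      let mid := (lo + hi) / 2
      if score ≥ pvThresholds.getD mid 0 then pvBucketGo fuel score (mid + 1) hi
      else pvBucketGo fuel score lo mid
    else lo

def pvBucket (score : Int) (lo hi : Nat) : Nat := pvBucketGo (hi - lo) score lo hi

def categorize_risk_levels_alt (scores : List (String × Int)) : List (String × String) :=
  (scores.foldl (fun d p =>
    d.insert p.1 (pvLabels.getD (pvBucket p.2 0 pvThresholds.length) ""))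
    (PySem.Dict.empty : PySem.Dict String String)).items

-- ===== PRECONDITION & SPEC =====
def Spec_categorize_risk_levels (scores : List (String × Int)) (out : List (String × String)) : Prop := out = categorize_risk_levels_alt scores
instance (scores : List (String × Int)) (out : List (String × String)) : Decidable (Spec_categorize_risk_levels scores out) := by unfold Spec_categorize_risk_levels; infer_instance

-- ===== CLAIM (what is proved, stated in full; the proofs are below) =====
def Claim_equal_categorize_risk_levels : Prop := ∀ (scores : List (String × Int)), Dom_categorize_risk_levels scores → Spec_categorize_risk_levels scores (categorize_risk_levels scores)

-- ===== LEMMAS AND PROOFS =====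

lemma pvBucket_eq (s : Int) :
    pvBucket s 0 4 = if s ≥ 80 then 4 else if s ≥ 60 then 3 else if s ≥ 40 then 2
      else if s ≥ 20 then 1 else 0 := by
  by_cases h80 : s ≥ 80
  · have h60 : s ≥ 60 := by omega
    simp [pvBucket, pvBucketGo, pvThresholds, h80, h60]
  · by_cases h60 : s ≥ 60
    · simp [pvBucket, pvBucketGo, pvThresholds, h80, h60]
    · by_cases h40 : s ≥ 40
      · simp [pvBucket, pvBucketGo, pvThresholds, h80, h60, h40]
      · by_cases h20 : s ≥ 20
        · simp [pvBucket, pvBucketGo, pvThresholds, h80, h60, h40, h20]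
        · simp [pvBucket, pvBucketGo, pvThresholds, h80, h60, h40, h20]

lemma pvLabel_eq (s : Int) :
    pvLabels.getD (pvBucket s 0 pvThresholds.length) "" =
      if s ≥ 80 then "Very High Risk" else if s ≥ 60 then "High Risk"
      else if s ≥ 40 then "Moderate Risk" else if s ≥ 20 then "Low Risk"
      else "Minimal Risk" := by
  have h : pvThresholds.length = 4 := rfl
  rw [h, pvBucket_eq]
  split_ifs <;> rfl

lemma fold_eq (scores : List (String × Int)) (d : PySem.Dict String String) :
    scores.foldl (fun risk_levels p =>
      if p.2 ≥ 80 then risk_levels.insert p.1 "Very High Risk"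
      else if p.2 ≥ 60 then risk_levels.insert p.1 "High Risk"
      else if p.2 ≥ 40 then risk_levels.insert p.1 "Moderate Risk"
      else if p.2 ≥ 20 then risk_levels.insert p.1 "Low Risk"
      else risk_levels.insert p.1 "Minimal Risk") d =
    scores.foldl (fun d p =>
      d.insert p.1 (pvLabels.getD (pvBucket p.2 0 pvThresholds.length) "")) d := by
  induction scores generalizing d with
  | nil => rfl
  | cons p rest ih =>
    simp only [List.foldl_cons]
    rw [pvLabel_eq]
    split_ifs <;> exact ih _

-- ===== VERDICT (by name: the statement is the Claim_ definition above) =====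
theorem categorize_risk_levels_spec : Claim_equal_categorize_risk_levels := by
  intro scores _
  exact congrArg PySem.Dict.items (fold_eq scores PySem.Dict.empty)
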